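-- pv_equiv track=rewrite | github.com/vincentxuu/FeedNav | feednav-data-fetcher/data_collector.py | _normalize_field_names
-- ===== SOURCE A (Python) =====
-- from typing import Any
--
-- def _normalize_field_names(data: dict[str, Any]) -> dict[str, Any]:
--     """
--     標準化 API 回傳的欄位名稱
--
--     Google Places API 請求用單數，但回傳可能用單數或複數
--     """
--     # 單數 -> 複數 的映射
--     field_mapping = {
--         'review': 'reviews',
--         'photo': 'photos',
--         'type': 'types',
--     }
--
--     normalized = dict(data)
--     for singular, plural in field_mapping.items():
--         if singular in normalized and plural not in normalized:
--             normalized[plural] = normalized.pop(singular)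
--
--     return normalized
-- ===== SOURCE B (Python) =====
-- from typing import Any
--
-- def _normalize_field_names(data: dict[str, Any]) -> dict[str, Any]:
--     """標準化 API 回傳的欄位名稱 (rebuild instead of copy-and-mutate)."""
--     field_mapping = {
--         'review': 'reviews',
--         'photo': 'photos',
--         'type': 'types',
--     }
--     renamed = [(s, p) for s, p in field_mapping.items()
--                if s in data and p not in data]
--     result = {k: v for k, v in data.items()
--               if all(k != s for s, _ in renamed)}
--     for s, p in renamed:
--         result[p] = data[s]
--     return result
-- ===== Notes on version B (the rewrite author's own statement) =====
-- stated objective: idiomatic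
-- what changed: Instead of copying the dict and mutating it with pop/reinsert per mapping entry, B first computes the list of renamings to apply, rebuilds the kept entries with a dict comprehension, and appends the renamed plural keys in one update loop.
import Mathlib
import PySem

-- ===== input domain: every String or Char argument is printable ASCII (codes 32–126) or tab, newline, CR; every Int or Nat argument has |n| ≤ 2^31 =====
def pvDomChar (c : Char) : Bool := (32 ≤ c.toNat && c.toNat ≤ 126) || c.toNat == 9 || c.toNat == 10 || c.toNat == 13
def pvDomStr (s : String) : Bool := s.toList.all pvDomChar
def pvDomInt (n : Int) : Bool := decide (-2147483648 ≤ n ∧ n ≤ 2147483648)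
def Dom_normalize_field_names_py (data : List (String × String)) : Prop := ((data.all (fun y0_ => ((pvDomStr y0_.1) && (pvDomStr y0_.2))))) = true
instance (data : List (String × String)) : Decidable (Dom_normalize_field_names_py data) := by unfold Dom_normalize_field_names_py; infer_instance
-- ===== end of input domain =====

-- B rebuilds the result (comprehension + update loop) instead of A's copy-then-pop/reinsert mutation; same return value, not claimed faster.

-- ===== PORT A =====
-- the literal field_mapping dict of both Pythons, as its items
def pvFieldMapping : List (String × String) :=
  [("review", "reviews"), ("photo", "photos"), ("type", "types")]

-- one iteration of A's loop body (the `none` branch of pop? is unreachable: it is guarded by `singular in normalized`)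
def pvStepA (n : PySem.Dict String String) (sp : String × String) : PySem.Dict String String :=
  if n.contains sp.1 && !(n.contains sp.2) then
    match n.pop? sp.1 with
    | some (v, n') => n'.insert sp.2 v
    | none => n
  else n

def normalize_field_names_py (data : List (String × String)) : List (String × String) :=
  (pvFieldMapping.foldl pvStepA (PySem.Dict.ofList data)).items

-- ===== PORT B =====
def normalize_field_names_py_alt (data : List (String × String)) : List (String × String) :=
  let d := PySem.Dict.ofList data
  let renamed := pvFieldMapping.filter (fun sp => d.contains sp.1 && !(d.contains sp.2))
  -- dict comprehension {k: v for k, v in data.items() if all(k != s …)}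
  let kept := (d.items.filter (fun kv => !(renamed.any (fun sp => kv.1 == sp.1)))).foldl
      (fun r kv => r.insert kv.1 kv.2) PySem.Dict.empty
  -- for s, p in renamed: result[p] = data[s]   (s ∈ data is guaranteed by renamed, so data[s] = getD d s "")
  (renamed.foldl (fun r sp => r.insert sp.2 (d.getD sp.1 "")) kept).items

-- ===== PRECONDITION & SPEC =====
def Spec_normalize_field_names_py (data : List (String × String)) (out : List (String × String)) : Prop := out = normalize_field_names_py_alt data
instance (data : List (String × String)) (out : List (String × String)) : Decidable (Spec_normalize_field_names_py data out) := by unfold Spec_normalize_field_names_py; infer_instance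

-- ===== CLAIM (what is proved, stated in full; the proofs are below) =====
def Claim_equal_normalize_field_names_py : Prop := ∀ (data : List (String × String)), Dom_normalize_field_names_py data → Spec_normalize_field_names_py data (normalize_field_names_py data)

-- ===== LEMMAS AND PROOFS =====

-- A's loop body does nothing when the guard fails
theorem stepA_of_not_cond (n : PySem.Dict String String) (sp : String × String)
    (h : (n.contains sp.1 && !(n.contains sp.2)) = false) : pvStepA n sp = n := by
  simp [pvStepA, h]

-- A's loop body, when the guard holds, drops the singular key and appends the plural with its value
theorem stepA_of_cond (n : PySem.Dict String String) (sp : String × String)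
    (h1 : n.contains sp.1 = true) (h2 : n.contains sp.2 = false) :
    pvStepA n sp
      = PySem.Dict.mk (n.items.filter (fun kv => !(kv.1 == sp.1)) ++ [(sp.2, n.getD sp.1 "")]) := by
  have hg : (n.contains sp.1 && !(n.contains sp.2)) = true := by simp [h1, h2]
  obtain ⟨v, hv⟩ : ∃ v, n.get? sp.1 = some v := by
    rw [PySem.Dict.contains_eq_isSome_get?] at h1
    exact Option.isSome_iff_exists.mp h1
  have herase : (n.erase sp.1).contains sp.2 = false := by
    simp only [PySem.Dict.contains, PySem.Dict.erase, List.any_filter] at h2 ⊢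
    simp only [List.any_eq_false] at h2 ⊢
    intro p hp
    simp [h2 p hp]
  simp only [pvStepA, hg, if_true, PySem.Dict.pop?, hv, Option.map_some]
  apply PySem.Dict.ext
  rw [PySem.Dict.items_insert_of_not_contains _ _ herase]
  simp [PySem.Dict.erase, PySem.Dict.getD_eq_get?_getD, hv]

-- find? for a key x is unaffected by filtering away another key s and appending a pair at a third key p
theorem find?_filter_ne (l : List (String × String)) (s x : String) (hx : x ≠ s) :
    List.find? (fun p => p.1 == x) (l.filter (fun kv => !(kv.1 == s)))
      = List.find? (fun p => p.1 == x) l := by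
  have hsx : (s == x) = false := by
    rw [beq_eq_false_iff_ne]; exact fun h => hx h.symm
  induction l with
  | nil => rfl
  | cons kv t ih =>
    cases hb : (kv.1 == s) with
    | true =>
      have hk : kv.1 = s := by simpa using hb
      have hbx : (kv.1 == x) = false := by rw [hk]; exact hsx
      simp [hb, hbx, ih]
    | false =>
      cases hbx : (kv.1 == x) with
      | true => simp [hb, hbx]
      | false => simp [hb, hbx, ih]

theorem get?_step_form (l : List (String × String)) (s p w x : String)
    (hxs : x ≠ s) (hxp : x ≠ p) :
    (PySem.Dict.mk (l.filter (fun kv => !(kv.1 == s)) ++ [(p, w)])).get? x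
      = (PySem.Dict.mk l).get? x := by
  simp only [PySem.Dict.get?, List.find?_append, find?_filter_ne l s x hxs]
  have : ((p, w).1 == x) = false := by simp; exact fun h => hxp h.symm
  simp [List.find?, this]

-- the guard of a later mapping entry, and the value it reads, are unchanged by an earlier applied step
theorem cond_step_invariant (n : PySem.Dict String String) (sp sq : String × String)
    (h1 : n.contains sp.1 = true) (h2 : n.contains sp.2 = false)
    (hss : sq.1 ≠ sp.1) (hsp : sq.1 ≠ sp.2) (hps : sq.2 ≠ sp.1) (hpp : sq.2 ≠ sp.2) :
    ((pvStepA n sp).contains sq.1 && !((pvStepA n sp).contains sq.2)) = (n.contains sq.1 && !(n.contains sq.2))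
      ∧ (pvStepA n sp).getD sq.1 "" = n.getD sq.1 "" := by
  rw [stepA_of_cond n sp h1 h2]
  cases n with
  | mk l =>
    constructor
    · simp only [PySem.Dict.contains_eq_isSome_get?,
        get?_step_form l sp.1 sp.2 _ sq.1 hss hsp,
        get?_step_form l sp.1 sp.2 _ sq.2 hps hpp]
    · simp only [PySem.Dict.getD_eq_get?_getD, get?_step_form l sp.1 sp.2 _ sq.1 hss hsp]

-- applied steps keep the keys duplicate-free
theorem nodup_keys_stepA (n : PySem.Dict String String) (sp : String × String)
    (hnd : n.keys.Nodup) : (pvStepA n sp).keys.Nodup := by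
  by_cases h : (n.contains sp.1 && !(n.contains sp.2)) = true
  · have h1 : n.contains sp.1 = true := by simp at h; exact h.1
    have h2 : n.contains sp.2 = false := by simp at h; exact h.2
    rw [stepA_of_cond n sp h1 h2]
    have hsub : (List.map Prod.fst (n.items.filter (fun kv => !(kv.1 == sp.1)))).Sublist n.keys :=
      List.Sublist.map Prod.fst (List.filter_sublist)
    have hnd' : (List.map Prod.fst (n.items.filter (fun kv => !(kv.1 == sp.1)))).Nodup :=
      hnd.sublist hsub
    have hp : sp.2 ∉ List.map Prod.fst (n.items.filter (fun kv => !(kv.1 == sp.1))) := by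
      intro hmem
      simp only [List.mem_map] at hmem
      obtain ⟨kv, hkv, hk⟩ := hmem
      have : n.contains sp.2 = true := by
        simp only [PySem.Dict.contains, List.any_eq_true]
        exact ⟨kv, (List.mem_filter.mp hkv).1, by simp [hk]⟩
      simp [this] at h
    simp only [PySem.Dict.keys, List.map_append, List.map_cons, List.map_nil]
    refine List.Nodup.append hnd' (List.nodup_singleton _) ?_
    intro a ha hb
    rw [List.mem_singleton] at hb
    subst hb
    exact hp ha
  · rw [stepA_of_not_cond n sp (by simpa using h)]; exact hnd

-- MAIN INVARIANT: running A's loop over mapping m rewrites the dict to "kept entries ++ renamed plurals"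
theorem foldA_items (m : List (String × String)) (d : PySem.Dict String String)
    (hnd : d.keys.Nodup)
    (hs : (m.map (·.1)).Nodup) (hp : (m.map (·.2)).Nodup)
    (hps : ∀ sp ∈ m, ∀ sq ∈ m, sp.2 ≠ sq.1) :
    (m.foldl pvStepA d).items
      = d.items.filter (fun kv => !((m.filter (fun sp => d.contains sp.1 && !(d.contains sp.2))).any (fun sp => kv.1 == sp.1)))
        ++ (m.filter (fun sp => d.contains sp.1 && !(d.contains sp.2))).map (fun sp => (sp.2, d.getD sp.1 "")) := by
  induction m generalizing d with
  | nil => simp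
  | cons sp rest ih =>
    by_cases h : (d.contains sp.1 && !(d.contains sp.2)) = true
    · have h1 : d.contains sp.1 = true := by simp at h; exact h.1
      have h2 : d.contains sp.2 = false := by simp at h; exact h.2
      have hinv : ∀ sq ∈ rest,
          ((pvStepA d sp).contains sq.1 && !((pvStepA d sp).contains sq.2)) = (d.contains sq.1 && !(d.contains sq.2))
            ∧ (pvStepA d sp).getD sq.1 "" = d.getD sq.1 "" := by
        intro sq hq
        refine cond_step_invariant d sp sq h1 h2 ?_ ?_ ?_ ?_
        · intro he
          have := hs; simp only [List.map_cons, List.nodup_cons] at this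
          exact this.1 (by simpa [he] using List.mem_map_of_mem (f := (·.1)) hq)
        · exact fun he => hps sp (List.mem_cons_self) sq (List.mem_cons_of_mem _ hq) he.symm
        · exact hps sq (List.mem_cons_of_mem _ hq) sp (List.mem_cons_self)
        · intro he
          have := hp; simp only [List.map_cons, List.nodup_cons] at this
          exact this.1 (by simpa [he] using List.mem_map_of_mem (f := (·.2)) hq)
      have hrec := ih (pvStepA d sp) (nodup_keys_stepA d sp hnd)
        (by simp only [List.map_cons, List.nodup_cons] at hs; exact hs.2)
        (by simp only [List.map_cons, List.nodup_cons] at hp; exact hp.2)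
        (fun a ha b hb => hps a (List.mem_cons_of_mem _ ha) b (List.mem_cons_of_mem _ hb))
      have hfc : rest.filter (fun sq => (pvStepA d sp).contains sq.1 && !((pvStepA d sp).contains sq.2))
          = rest.filter (fun sq => d.contains sq.1 && !(d.contains sq.2)) :=
        List.filter_congr (fun sq hq => (hinv sq hq).1)
      rw [List.foldl_cons, hrec, hfc]
      rw [List.map_congr_left (fun sq hq => by
        rw [(hinv sq (List.mem_filter.mp hq).1).2])]
      rw [stepA_of_cond d sp h1 h2]
      -- now both sides are about d.items
      have hpnotin : ((rest.filter (fun sq => d.contains sq.1 && !(d.contains sq.2))).any (fun sq => sp.2 == sq.1)) = false := by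
        simp only [List.any_eq_false]
        intro sq hq he
        exact hps sp (List.mem_cons_self) sq (List.mem_cons_of_mem _ (List.mem_filter.mp hq).1)
          (by simpa using he)
      rw [List.filter_cons_of_pos (p := fun sq => d.contains sq.1 && !(d.contains sq.2))
        (l := rest) h, List.map_cons]
      simp only [List.filter_append, List.filter_cons, List.filter_nil,
        hpnotin, Bool.not_false, if_true, List.filter_filter]
      rw [List.append_assoc, List.singleton_append]
      congr 1
      apply List.filter_congr
      intro kv _
      simp only [List.any_cons, Bool.not_or]
      cases hb : (kv.1 == sp.1) <;> simp
    · have hfalse : (d.contains sp.1 && !(d.contains sp.2)) = false := by simpa using h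
      have hstep : pvStepA d sp = d := stepA_of_not_cond d sp hfalse
      rw [List.foldl_cons, hstep,
        ih d hnd
          (by simp only [List.map_cons, List.nodup_cons] at hs; exact hs.2)
          (by simp only [List.map_cons, List.nodup_cons] at hp; exact hp.2)
          (fun a ha b hb => hps a (List.mem_cons_of_mem _ ha) b (List.mem_cons_of_mem _ hb))]
      simp [hfalse]

-- B computes exactly that "kept entries ++ renamed plurals" list
theorem alt_items (data : List (String × String)) :
    normalize_field_names_py_alt data
      = (PySem.Dict.ofList data).items.filter
          (fun kv => !((pvFieldMapping.filter (fun sp => (PySem.Dict.ofList data).contains sp.1 && !((PySem.Dict.ofList data).contains sp.2))).any (fun sp => kv.1 == sp.1)))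
        ++ (pvFieldMapping.filter (fun sp => (PySem.Dict.ofList data).contains sp.1 && !((PySem.Dict.ofList data).contains sp.2))).map
            (fun sp => (sp.2, (PySem.Dict.ofList data).getD sp.1 "")) := by
  unfold normalize_field_names_py_alt
  set d := PySem.Dict.ofList data with hd
  set renamed := pvFieldMapping.filter (fun sp => d.contains sp.1 && !(d.contains sp.2)) with hren
  set kept0 := d.items.filter (fun kv => !(renamed.any (fun sp => kv.1 == sp.1))) with hkept
  have hnd : d.keys.Nodup := PySem.Dict.nodup_keys_ofList data
  -- the comprehension: inserting the kept (distinct-key) items into an empty dict lists them back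
  have hndl : (d.items.map (fun kv => kv.1)).Nodup := by
    simpa [PySem.Dict.keys] using hnd
  have hkeys : (kept0.map (fun kv => kv.1)).Nodup := by
    have hsub : (kept0.map (fun kv => kv.1)).Sublist (d.items.map (fun kv => kv.1)) :=
      List.Sublist.map _ (List.filter_sublist)
    exact hndl.sublist hsub
  have hkept_items : (kept0.foldl (fun r kv => r.insert kv.1 kv.2) PySem.Dict.empty).items = kept0 := by
    have := PySem.Dict.items_foldl_insert_fresh kept0 (fun kv => kv.1) (fun kv => kv.2)
      PySem.Dict.empty (fun a _ => PySem.Dict.contains_empty _) hkeys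
    simpa using this
  -- the update loop: the plural keys are absent from kept and pairwise distinct, so they append
  have hfresh : ∀ sp ∈ renamed,
      (kept0.foldl (fun r kv => r.insert kv.1 kv.2) PySem.Dict.empty).contains sp.2 = false := by
    intro sp hsp
    have h2 : (d.items.any (fun p => p.1 == sp.2)) = false := by
      have hc := (List.mem_filter.mp hsp).2
      simp only [Bool.and_eq_true, Bool.not_eq_true'] at hc
      simpa [PySem.Dict.contains] using hc.2
    simp only [PySem.Dict.contains, hkept_items]
    simp only [List.any_eq_false] at h2 ⊢
    intro p hp
    exact h2 p (List.mem_filter.mp hp).1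
  have hpnodup : (renamed.map (fun sp => sp.2)).Nodup := by
    have hsub : (renamed.map (fun sp => sp.2)).Sublist (pvFieldMapping.map (fun sp => sp.2)) :=
      List.Sublist.map _ (List.filter_sublist)
    have hm : (pvFieldMapping.map (fun sp => sp.2)).Nodup := by decide
    exact hm.sublist hsub
  have hfinal := PySem.Dict.items_foldl_insert_fresh renamed (fun sp => sp.2)
    (fun sp => d.getD sp.1 "") (kept0.foldl (fun r kv => r.insert kv.1 kv.2) PySem.Dict.empty)
    hfresh hpnodup
  rw [hkept_items] at hfinal
  exact hfinal

-- ===== VERDICT (by name: the statement is the Claim_ definition above) =====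
theorem normalize_field_names_py_spec : Claim_equal_normalize_field_names_py := by
  intro data _
  unfold Spec_normalize_field_names_py normalize_field_names_py
  rw [alt_items data]
  exact foldA_items pvFieldMapping (PySem.Dict.ofList data)
    (PySem.Dict.nodup_keys_ofList data) (by decide) (by decide) (by decide)
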